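-- pv_equiv track=rewrite | github.com/sometimeslove/pythontest | 算法/动态规划/最大k段乘积.py | upToDown
-- ===== SOURCE A (Python) =====
-- def upToDown(arr,x,y, k):
--      # # 值
--      # value = [0 for i in range(0,len(arr))]
--      # # 标志位
--      # flag = [0 for i in range(0,len(arr))]
--      if k==0:
--          return GetArrValue(arr,x,y)
--      maxvalue = 0
--      for m in range(x,y-k+1):
--          tmp = GetArrValue(arr,x,m)*upToDown(arr,m+1,y,k-1)
--          if tmp>maxvalue:
--              maxvalue = tmp
--      return maxvalue
--
-- def GetArrValue(arr,x,y):
--     if x>y :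
--         return 0
--     tmp=0
--     for i in range(x,y+1):
--         tmp = tmp*10 + arr[i]
--     return tmp
-- ===== SOURCE B (Python) =====
-- def _seg(arr, s, t):
--     if s > t:
--         return 0
--     v = 0
--     for i in range(s, t + 1):
--         v = v * 10 + arr[i]
--     return v
--
-- def upToDown(arr, x, y, k):
--     # Bottom-up DP over segment count instead of A's exponential recursion.
--     if k == 0:
--         return _seg(arr, x, y)
--     if y - k < x:
--         return 0  # fewer elements than segments: no split exists
--     # prev[s - x] = best value using kk segments starting at s (kk levels built iteratively)
--     prev = [_seg(arr, s, y) for s in range(x, y + 1)]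
--     for kk in range(1, k + 1):
--         cur = []
--         for s in range(x, y + 1):
--             best = 0
--             v = 0
--             for m in range(s, y - kk + 1):
--                 v = v * 10 + arr[m]
--                 t = v * prev[m + 1 - x]
--                 if t > best:
--                     best = t
--             cur.append(best)
--         prev = cur
--     return prev[0] if prev else 0
-- ===== Notes on version B (the rewrite author's own statement) =====
-- stated objective: alternative
-- what changed: A's exponential recursion over (start, k) is replaced by a bottom-up DP that builds, for each segment count from 0 to k, the table of best values for every start index, with segment values accumulated incrementally in the inner loop.
import Mathlib
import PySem

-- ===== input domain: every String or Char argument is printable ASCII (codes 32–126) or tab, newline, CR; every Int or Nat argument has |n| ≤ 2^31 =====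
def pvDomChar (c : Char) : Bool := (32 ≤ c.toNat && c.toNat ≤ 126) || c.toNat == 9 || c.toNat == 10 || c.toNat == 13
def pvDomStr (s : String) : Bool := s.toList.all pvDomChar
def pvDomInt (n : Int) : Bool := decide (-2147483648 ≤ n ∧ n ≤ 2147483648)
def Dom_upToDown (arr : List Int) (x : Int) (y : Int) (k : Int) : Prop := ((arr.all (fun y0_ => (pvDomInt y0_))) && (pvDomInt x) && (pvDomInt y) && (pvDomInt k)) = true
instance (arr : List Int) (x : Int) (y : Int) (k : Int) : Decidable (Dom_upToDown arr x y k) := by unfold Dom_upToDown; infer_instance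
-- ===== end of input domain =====

-- B replaces A's recursion over (start, k) by a bottom-up DP building, level by level, the
-- list of best values for each start index (objective: alternative algorithm).

-- ===== PORT A =====
-- GetArrValue(arr, x, y)
def pvGAV (arr : List Int) (x : Int) (y : Int) : Int :=
  if x > y then 0
  else (PySem.List.pyRange x (y + 1) 1).foldl (fun tmp i => tmp * 10 + PySem.List.pyGetD arr i 0) 0

-- the recursion of upToDown; fuel = k.toNat gates the recursive call (never exhausted for k ≥ 0)
def upToDownGo (arr : List Int) (y : Int) (fuel : Nat) (x : Int) (k : Int) : Int :=
  if k = 0 then pvGAV arr x y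
  else
    (PySem.List.pyRange x (y - k + 1) 1).foldl
      (fun maxv m =>
        let tmp := pvGAV arr x m *
          (match fuel with
           | 0 => 0
           | f + 1 => upToDownGo arr y f (m + 1) (k - 1))
        if maxv < tmp then tmp else maxv) 0

def upToDown (arr : List Int) (x : Int) (y : Int) (k : Int) : Int :=
  upToDownGo arr y k.toNat x k

-- ===== PORT B =====
-- _seg(arr, s, t)
def pvSeg (arr : List Int) (s : Int) (t : Int) : Int :=
  if s > t then 0
  else (PySem.List.pyRange s (t + 1) 1).foldl (fun v i => v * 10 + PySem.List.pyGetD arr i 0) 0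

-- body of B's loop over s: the inner loop over m with the two accumulators (best, v)
def pvInner (arr : List Int) (x : Int) (y : Int) (kk : Int) (prev : List Int) (s : Int) : Int :=
  ((PySem.List.pyRange s (y - kk + 1) 1).foldl
      (fun bv m =>
        let v := bv.2 * 10 + PySem.List.pyGetD arr m 0
        let t := v * PySem.List.pyGetD prev (m + 1 - x) 0
        (if bv.1 < t then t else bv.1, v)) ((0 : Int), (0 : Int))).1

-- one level kk: cur = [inner-loop result for s in range(x, y+1)]
def pvLevel (arr : List Int) (x : Int) (y : Int) (kk : Int) (prev : List Int) : List Int :=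
  (PySem.List.pyRange x (y + 1) 1).map (pvInner arr x y kk prev)

def upToDown_alt (arr : List Int) (x : Int) (y : Int) (k : Int) : Int :=
  if k = 0 then pvSeg arr x y
  else if y - k < x then 0
  else
    let prev0 := (PySem.List.pyRange x (y + 1) 1).map (fun s => pvSeg arr s y)
    let prev := (PySem.List.pyRange 1 (k + 1) 1).foldl (fun p kk => pvLevel arr x y kk p) prev0
    match prev with
    | [] => 0
    | p :: _ => p

-- ===== PRECONDITION & SPEC =====
-- Pre_ admits exactly the inputs on which Python A returns: either the top-level loop body is
-- never entered (y - k < x, result 0), or k ≥ 0 and every index of arr the recursion touches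
-- (they all lie in [x, y]) is valid under Python's negative-index rule; on all other inputs A
-- raises IndexError (with k < 0 the recursion widens the range until an index is out of range).
def Pre_upToDown (arr : List Int) (x : Int) (y : Int) (k : Int) : Prop :=
  y - k < x ∨ (0 ≤ k ∧ -(arr.length : Int) ≤ x ∧ y < (arr.length : Int))
instance (arr : List Int) (x : Int) (y : Int) (k : Int) : Decidable (Pre_upToDown arr x y k) := by unfold Pre_upToDown; infer_instance

def pvWitness_upToDown : List Int × Int × Int × Int := ([1, 2, 3], 0, 2, 1)

def Spec_upToDown (arr : List Int) (x : Int) (y : Int) (k : Int) (out : Int) : Prop := out = upToDown_alt arr x y k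
instance (arr : List Int) (x : Int) (y : Int) (k : Int) (out : Int) : Decidable (Spec_upToDown arr x y k out) := by unfold Spec_upToDown; infer_instance

-- ===== CLAIM (what is proved, stated in full; the proofs are below) =====
def Claim_equal_upToDown : Prop := ∀ (arr : List Int) (x : Int) (y : Int) (k : Int), Dom_upToDown arr x y k → Pre_upToDown arr x y k → Spec_upToDown arr x y k (upToDown arr x y k)

-- ===== LEMMAS AND PROOFS =====

-- appending one digit: GetArrValue(arr, s, m) = GetArrValue(arr, s, m-1) * 10 + arr[m]
lemma pvSeg_step (arr : List Int) (s m : Int) (h : s ≤ m) :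
    pvGAV arr s m = pvGAV arr s (m - 1) * 10 + PySem.List.pyGetD arr m 0 := by
  unfold pvGAV
  rw [if_neg (by omega), PySem.List.pyRange_one_succ_right h, List.foldl_append]
  rcases eq_or_lt_of_le h with hsm | hsm
  · rw [if_pos (by omega), ← hsm, PySem.List.pyRange_one_eq_nil (le_refl s)]
    simp
  · rw [if_neg (by omega)]
    have : m - 1 + 1 = m := by omega
    rw [this]
    simp

-- invariant of B's inner loop: second component is the running segment value, first the running max
lemma pvInner_inv (arr : List Int) (x : Int) (prev : List Int) (s : Int) :
    ∀ (n : Nat) (t : Int), (t - s).toNat = n →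
      (PySem.List.pyRange s t 1).foldl
          (fun bv m =>
            let v := bv.2 * 10 + PySem.List.pyGetD arr m 0
            let tt := v * PySem.List.pyGetD prev (m + 1 - x) 0
            (if bv.1 < tt then tt else bv.1, v)) ((0 : Int), (0 : Int))
        = ((PySem.List.pyRange s t 1).foldl
            (fun maxv m =>
              let tmp := pvGAV arr s m * PySem.List.pyGetD prev (m + 1 - x) 0
              if maxv < tmp then tmp else maxv) 0,
           pvGAV arr s (t - 1)) := by
  intro n
  induction n with
  | zero =>
      intro t ht
      rw [PySem.List.pyRange_one_eq_nil (by omega)]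
      simp only [List.foldl_nil]
      rw [pvGAV, if_pos (by omega : s > t - 1)]
  | succ n ih =>
      intro t ht
      have hst : s ≤ t - 1 := by omega
      have h1 : t = (t - 1) + 1 := by omega
      rw [h1, PySem.List.pyRange_one_succ_right hst, List.foldl_append, List.foldl_append,
        ih (t - 1) (by omega)]
      simp only [List.foldl_cons, List.foldl_nil]
      rw [← pvSeg_step arr s (t - 1) hst]
      simp

-- A's recursion unfolded once, for k ≥ 1 (fuel k.toNat never runs out)
lemma upToDown_step (arr : List Int) (x y k : Int) (h : 1 ≤ k) :
    upToDown arr x y k =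
      (PySem.List.pyRange x (y - k + 1) 1).foldl
        (fun maxv m =>
          let tmp := pvGAV arr x m * upToDown arr (m + 1) y (k - 1)
          if maxv < tmp then tmp else maxv) 0 := by
  have hk : k.toNat = (k - 1).toNat + 1 := by omega
  unfold upToDown
  rw [hk, upToDownGo, if_neg (by omega)]

-- one DP level reproduces A's values at the next segment count
lemma pvLevel_eq (arr : List Int) (x y kk : Int) (h : 1 ≤ kk) :
    pvLevel arr x y kk ((PySem.List.pyRange x (y + 1) 1).map (fun s => upToDown arr s y (kk - 1)))
      = (PySem.List.pyRange x (y + 1) 1).map (fun s => upToDown arr s y kk) := by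
  unfold pvLevel
  apply List.map_congr_left
  intro s hs
  rw [PySem.List.mem_pyRange_one] at hs
  unfold pvInner
  rw [pvInner_inv arr x _ s (y - kk + 1 - s).toNat (y - kk + 1) rfl]
  rw [upToDown_step arr s y kk h]
  apply PySem.List.foldl_congr_mem
  intro acc m hm
  rw [PySem.List.mem_pyRange_one] at hm
  have hidx : m + 1 - x = (((m + 1 - x).toNat : Nat) : Int) := by omega
  rw [hidx, PySem.List.pyGetD_map_pyRange_one (fun s => upToDown arr s y (kk - 1)) x (y + 1)
        ((m + 1 - x).toNat) 0 (by omega)]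
  have : x + ((m + 1 - x).toNat : Int) = m + 1 := by omega
  rw [this]

-- the whole DP: after K levels the table holds A's values for segment count K
lemma pvDP_inv (arr : List Int) (x y : Int) :
    ∀ (K : Nat),
      (PySem.List.pyRange 1 ((K : Int) + 1) 1).foldl (fun p kk => pvLevel arr x y kk p)
          ((PySem.List.pyRange x (y + 1) 1).map (fun s => pvSeg arr s y))
        = (PySem.List.pyRange x (y + 1) 1).map (fun s => upToDown arr s y (K : Int)) := by
  intro K
  induction K with
  | zero =>
      have h0 : PySem.List.pyRange 1 (((0 : Nat) : Int) + 1) 1 = [] :=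
        PySem.List.pyRange_one_eq_nil (by norm_num)
      rw [h0]
      simp only [List.foldl_nil, Nat.cast_zero]
      apply List.map_congr_left
      intro s _
      simp [pvSeg, upToDown, upToDownGo, pvGAV]
  | succ K ih =>
      have hc : ((K + 1 : Nat) : Int) + 1 = ((K : Int) + 1) + 1 := by push_cast; ring
      have h2 : PySem.List.pyRange 1 (((K : Int) + 1) + 1) 1
          = PySem.List.pyRange 1 ((K : Int) + 1) 1 ++ [(K : Int) + 1] :=
        PySem.List.pyRange_one_succ_right (by omega)
      rw [hc, h2, List.foldl_append, ih]
      simp only [List.foldl_cons, List.foldl_nil]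
      have := pvLevel_eq arr x y ((K : Int) + 1) (by omega)
      simp only [add_sub_cancel_right] at this
      rw [this]
      push_cast
      rfl

-- the equivalence, assembled case by case
lemma upToDown_spec_core (arr : List Int) (x y k : Int)
    (hpre : Pre_upToDown arr x y k) : upToDown arr x y k = upToDown_alt arr x y k := by
  by_cases hk0 : k = 0
  · subst hk0
    simp [upToDown, upToDownGo, upToDown_alt, pvGAV, pvSeg]
  · by_cases hcut : y - k < x
    · rw [upToDown, upToDownGo, if_neg hk0, PySem.List.pyRange_one_eq_nil (by omega)]
      rw [upToDown_alt, if_neg hk0, if_pos hcut]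
      simp
    · have hk1 : 1 ≤ k := by
        rcases hpre with h | ⟨h, _⟩ <;> omega
      rw [upToDown_alt, if_neg hk0, if_neg hcut]
      have hkk : k = ((k.toNat : Nat) : Int) := by omega
      have hdp := pvDP_inv arr x y k.toNat
      rw [← hkk] at hdp
      simp only [hdp]
      have hxy : x < y + 1 := by omega
      rw [PySem.List.pyRange_one_cons hxy]
      simp

-- ===== VERDICT (by name: the statement is the Claim_ definition above) =====
theorem upToDown_spec : Claim_equal_upToDown := by
  intro arr x y k _ hpre
  exact upToDown_spec_core arr x y k hpre
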